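-- pv_equiv track=rewrite | github.com/smarczewski/algo1_ballenato | funcionalidad_3.py | encontrar_invocaciones
-- ===== SOURCE A (Python) =====
-- def encontrar_invocaciones(linea, funciones):
--     """[Autor: Jean Paul Yatim]
--     [Ayuda: Crea un diccionario para una funcion, con las
--     claves siendo las funciones que son invocadas por ella
--     y sus valores la cantidad de veces que es invocada]"""
--     veces_llamado = {}
--     for func_llamada in funciones:
--         for codigo in linea[3:-1]:
--             if "{}(".format(func_llamada) in codigo and\
--                func_llamada not in veces_llamado:
--                 veces_llamado[func_llamada] = 1
--             elif "{}(".format(func_llamada) in codigo and\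
--                  func_llamada in veces_llamado:
--                 veces_llamado[func_llamada] += 1
--     return veces_llamado
-- ===== SOURCE B (Python) =====
-- def _encontradas(codigo, names, lens):
--     """Names from `names` that occur immediately before some '(' in `codigo`."""
--     found = {}
--     for i, ch in enumerate(codigo):
--         if ch == '(':
--             for L in lens:
--                 if L <= i:
--                     cand = codigo[i - L:i]
--                     if cand in names:
--                         found[cand] = True
--     return found
--
--
-- def encontrar_invocaciones(linea, funciones):
--     # One scan per line over the '(' positions, matching each preceding
--     # substring against the queried name set (keyed by the distinct name
--     # lengths), instead of one pass over the lines per queried function.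
--     names = set(funciones)
--     lens = list(dict.fromkeys(len(f) for f in funciones))
--     occ = {}
--     for codigo in linea[3:-1]:
--         for f in _encontradas(codigo, names, lens):
--             occ[f] = occ.get(f, 0) + 1
--     res = {}
--     for f in funciones:
--         c = occ.get(f, 0)
--         if c:
--             res[f] = res.get(f, 0) + c
--     return res
-- ===== Notes on version B (the rewrite author's own statement) =====
-- stated objective: faster
-- what changed: A runs one substring search over all scanned lines per queried function (O(F*L*len)); B scans each line once, matching the substring that precedes each '(' against the set of queried names keyed by the distinct name lengths, then assembles the per-function counts in one pass over the query list.
import Mathlib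
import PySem

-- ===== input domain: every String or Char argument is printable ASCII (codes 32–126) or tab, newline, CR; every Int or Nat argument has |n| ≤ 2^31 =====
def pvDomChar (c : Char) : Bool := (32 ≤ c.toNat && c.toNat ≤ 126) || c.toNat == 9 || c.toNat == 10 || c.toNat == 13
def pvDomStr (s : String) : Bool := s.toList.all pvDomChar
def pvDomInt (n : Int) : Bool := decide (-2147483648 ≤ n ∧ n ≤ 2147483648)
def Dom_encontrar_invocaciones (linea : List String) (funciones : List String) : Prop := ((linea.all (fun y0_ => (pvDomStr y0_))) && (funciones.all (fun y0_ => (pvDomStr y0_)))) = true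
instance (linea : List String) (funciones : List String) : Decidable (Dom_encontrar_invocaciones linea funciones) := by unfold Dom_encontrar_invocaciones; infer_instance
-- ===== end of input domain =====

-- B replaces A's per-function pass over the lines by a single scan per line over the
-- '(' positions, matching each preceding substring against the set of queried names.

-- ===== PORT A =====
def encontrar_invocaciones (linea : List String) (funciones : List String) : List (String × Int) :=
  (funciones.foldl (fun veces f =>
      (PySem.List.slice linea (some 3) (some (-1))).foldl (fun veces codigo =>
        if PySem.Chars.isIn (f.toList ++ ['(']) codigo.toList && !(PySem.Dict.contains veces f) then
          veces.insert f 1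
        else if PySem.Chars.isIn (f.toList ++ ['(']) codigo.toList && PySem.Dict.contains veces f then
          veces.insert f (veces.getD f 0 + 1)
        else veces) veces)
    (PySem.Dict.empty : PySem.Dict String Int)).items

-- ===== PORT B =====
-- port of Source B's helper `_encontradas`: the names occurring right before some '(' in `codigo`
def pvEncontradas (codigo : String) (names : PySem.Set String) (lens : List Int) : PySem.Set String :=
  (PySem.List.enumerate codigo.toList 0).foldl (fun found p =>
    if p.2 = '(' then
      lens.foldl (fun found L =>
        if L ≤ p.1 then
          let cand := PySem.Str.slice codigo (some (p.1 - L)) (some p.1)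
          if PySem.Set.contains names cand then PySem.Set.add found cand else found
        else found) found
    else found) PySem.Set.empty

def encontrar_invocaciones_alt (linea : List String) (funciones : List String) : List (String × Int) :=
  let names : PySem.Set String := PySem.Set.ofList funciones
  let lens : List Int := PySem.List.dedup (funciones.map (fun f => PySem.Str.len f))
  let occ : PySem.Dict String Int :=
    (PySem.List.slice linea (some 3) (some (-1))).foldl (fun occ codigo =>
      (pvEncontradas codigo names lens).foldl (fun o f => o.insert f (o.getD f 0 + 1)) occ)
      PySem.Dict.empty
  (funciones.foldl (fun res f =>
      let c := occ.getD f 0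
      if c ≠ 0 then res.insert f (res.getD f 0 + c) else res)
    (PySem.Dict.empty : PySem.Dict String Int)).items

-- ===== PRECONDITION & SPEC =====
def Spec_encontrar_invocaciones (linea : List String) (funciones : List String) (out : List (String × Int)) : Prop := out = encontrar_invocaciones_alt linea funciones
instance (linea : List String) (funciones : List String) (out : List (String × Int)) : Decidable (Spec_encontrar_invocaciones linea funciones out) := by unfold Spec_encontrar_invocaciones; infer_instance

-- ===== CLAIM (what is proved, stated in full; the proofs are below) =====
def Claim_equal_encontrar_invocaciones : Prop := ∀ (linea : List String) (funciones : List String), Dom_encontrar_invocaciones linea funciones → Spec_encontrar_invocaciones linea funciones (encontrar_invocaciones linea funciones)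

-- ===== LEMMAS AND PROOFS =====

-- line `codigo` invokes `g`: the substring test A performs
def pvHit (g codigo : String) : Bool := PySem.Chars.isIn (g.toList ++ ['(']) codigo.toList

-- number of scanned lines on which `g` is invoked
def pvCnt (linea : List String) (g : String) : Nat :=
  (PySem.List.slice linea (some 3) (some (-1))).countP (fun c => pvHit g c)

-- B's per-line found set, at the arguments B passes
def pvFound (funciones : List String) (codigo : String) : PySem.Set String :=
  pvEncontradas codigo (PySem.Set.ofList funciones)
    (PySem.List.dedup (funciones.map (fun f => PySem.Str.len f)))

-- the common shape both ports are reduced to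
def pvChar (linea funciones : List String) : List (String × Int) :=
  (funciones.foldl (fun d f =>
      if pvCnt linea f = 0 then d else d.insert f (d.getD f 0 + (pvCnt linea f : Int)))
    (PySem.Dict.empty : PySem.Dict String Int)).items

lemma pvLen_cast (f : String) : PySem.Str.len f = (f.toList.length : Int) := by simp

-- A's two branches are one counting update
lemma pvA_step (g codigo : String) (d : PySem.Dict String Int) :
    (if PySem.Chars.isIn (g.toList ++ ['(']) codigo.toList && !(PySem.Dict.contains d g) then
        d.insert g 1
      else if PySem.Chars.isIn (g.toList ++ ['(']) codigo.toList && PySem.Dict.contains d g then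
        d.insert g (d.getD g 0 + 1)
      else d)
    = if pvHit g codigo then d.insert g (d.getD g 0 + 1) else d := by
  unfold pvHit
  cases h : PySem.Chars.isIn (g.toList ++ ['(']) codigo.toList
  · simp
  · cases hc : PySem.Dict.contains d g
    · simp [PySem.Dict.getD_of_not_contains d (0 : Int) hc]
    · simp

-- A's inner loop over the lines bumps key g by the number of matching lines
lemma pvA_inner (g : String) (ls : List String) (d : PySem.Dict String Int) :
    ls.foldl (fun veces codigo => if pvHit g codigo then veces.insert g (veces.getD g 0 + 1) else veces) d
    = if ls.countP (fun c => pvHit g c) = 0 then d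
      else d.insert g (d.getD g 0 + (ls.countP (fun c => pvHit g c) : Int)) := by
  induction ls generalizing d with
  | nil => simp
  | cons c rest ih =>
    rw [List.foldl_cons, List.countP_cons]
    by_cases h : pvHit g c = true
    · simp only [h, if_true]
      rw [ih]
      by_cases hr : rest.countP (fun c => pvHit g c) = 0
      · simp [hr]
      · have h1 : rest.countP (fun c => pvHit g c) + 1 ≠ 0 := by omega
        simp only [hr, if_false, h1, PySem.Dict.getD_insert_self, PySem.Dict.insert_insert_self]
        congr 1
        push_cast
        ring
    · simp [h, ih]

lemma pvA_char (linea funciones : List String) :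
    encontrar_invocaciones linea funciones = pvChar linea funciones := by
  unfold encontrar_invocaciones pvChar
  congr 1
  apply PySem.List.foldl_congr_mem
  intro d f _
  have hstep : (fun (veces : PySem.Dict String Int) codigo =>
      if PySem.Chars.isIn (f.toList ++ ['(']) codigo.toList && !(PySem.Dict.contains veces f) then
        veces.insert f 1
      else if PySem.Chars.isIn (f.toList ++ ['(']) codigo.toList && PySem.Dict.contains veces f then
        veces.insert f (veces.getD f 0 + 1)
      else veces)
      = (fun (veces : PySem.Dict String Int) codigo =>
        if pvHit f codigo then veces.insert f (veces.getD f 0 + 1) else veces) := by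
    funext veces codigo
    exact pvA_step f codigo veces
  rw [hstep, pvA_inner]
  rfl

-- membership in the inner loop over the candidate lengths
lemma pvMem_inner (names found : PySem.Set String) (codigo : String) (i : Int) (lens : List Int) (g : String) :
    g ∈ lens.foldl (fun found L =>
        if L ≤ i then
          let cand := PySem.Str.slice codigo (some (i - L)) (some i)
          if PySem.Set.contains names cand then PySem.Set.add found cand else found
        else found) found
    ↔ g ∈ found ∨ (g ∈ names ∧ ∃ L ∈ lens, L ≤ i ∧ PySem.Str.slice codigo (some (i - L)) (some i) = g) := by
  induction lens generalizing found with
  | nil => simp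
  | cons L rest ih =>
    rw [List.foldl_cons]
    by_cases hL : L ≤ i
    · by_cases hc : PySem.Set.contains names (PySem.Str.slice codigo (some (i - L)) (some i)) = true
      · simp only [hL, if_true, hc, ih, PySem.Set.mem_add]
        constructor
        · rintro ((hf | he) | h)
          · exact Or.inl hf
          · exact Or.inr ⟨he ▸ (PySem.Set.contains_iff _ _).mp hc, L, by simp, hL, he.symm⟩
          · exact Or.inr ⟨h.1, by obtain ⟨L', hL', h2, h3⟩ := h.2; exact ⟨L', by simp [hL'], h2, h3⟩⟩
        · rintro (hf | ⟨hn, L', hL', h2, h3⟩)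
          · exact Or.inl (Or.inl hf)
          · rcases List.mem_cons.mp hL' with rfl | hmem
            · exact Or.inl (Or.inr h3.symm)
            · exact Or.inr ⟨hn, L', hmem, h2, h3⟩
      · simp only [hL, if_true, hc, ih]
        constructor
        · rintro (hf | h)
          · exact Or.inl hf
          · exact Or.inr ⟨h.1, by obtain ⟨L', hL', h2, h3⟩ := h.2; exact ⟨L', by simp [hL'], h2, h3⟩⟩
        · rintro (hf | ⟨hn, L', hL', h2, h3⟩)
          · exact Or.inl hf
          · rcases List.mem_cons.mp hL' with rfl | hmem
            · exact absurd ((PySem.Set.contains_iff _ _).mpr (h3 ▸ hn)) (by simpa using hc)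
            · exact Or.inr ⟨hn, L', hmem, h2, h3⟩
    · simp only [hL, if_false, ih]
      constructor
      · rintro (hf | ⟨hn, L', hL', h2, h3⟩)
        · exact Or.inl hf
        · exact Or.inr ⟨hn, L', by simp [hL'], h2, h3⟩
      · rintro (hf | ⟨hn, L', hL', h2, h3⟩)
        · exact Or.inl hf
        · rcases List.mem_cons.mp hL' with rfl | hmem
          · exact absurd h2 hL
          · exact Or.inr ⟨hn, L', hmem, h2, h3⟩

-- membership in the scan over the (index, char) pairs
lemma pvMem_scan (names acc : PySem.Set String) (codigo : String) (lens : List Int) (l : List (Int × Char)) (g : String) :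
    g ∈ l.foldl (fun found p =>
        if p.2 = '(' then
          lens.foldl (fun found L =>
            if L ≤ p.1 then
              let cand := PySem.Str.slice codigo (some (p.1 - L)) (some p.1)
              if PySem.Set.contains names cand then PySem.Set.add found cand else found
            else found) found
        else found) acc
    ↔ g ∈ acc ∨ (g ∈ names ∧ ∃ p ∈ l, p.2 = '(' ∧ ∃ L ∈ lens, L ≤ p.1 ∧
        PySem.Str.slice codigo (some (p.1 - L)) (some p.1) = g) := by
  induction l generalizing acc with
  | nil => simp
  | cons p rest ih =>
    rw [List.foldl_cons]
    by_cases hp : p.2 = '('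
    · simp only [hp, if_true, ih, pvMem_inner]
      constructor
      · rintro ((hf | ⟨hn, L, hL, h2, h3⟩) | ⟨hn, q, hq, hq2, h⟩)
        · exact Or.inl hf
        · exact Or.inr ⟨hn, p, by simp, hp, L, hL, h2, h3⟩
        · exact Or.inr ⟨hn, q, by simp [hq], hq2, h⟩
      · rintro (hf | ⟨hn, q, hq, hq2, h⟩)
        · exact Or.inl (Or.inl hf)
        · rcases List.mem_cons.mp hq with rfl | hmem
          · exact Or.inl (Or.inr ⟨hn, h⟩)
          · exact Or.inr ⟨hn, q, hmem, hq2, h⟩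
    · simp only [hp, if_false, ih]
      constructor
      · rintro (hf | ⟨hn, q, hq, hq2, h⟩)
        · exact Or.inl hf
        · exact Or.inr ⟨hn, q, by simp [hq], hq2, h⟩
      · rintro (hf | ⟨hn, q, hq, hq2, h⟩)
        · exact Or.inl hf
        · rcases List.mem_cons.mp hq with rfl | hmem
          · exact absurd hq2 hp
          · exact Or.inr ⟨hn, q, hmem, hq2, h⟩

-- a slice with natural in-range bounds is take/drop
lemma pvSlice_toList (codigo : String) (k L : Nat) (hL : L ≤ k) :
    (PySem.Str.slice codigo (some ((k : Int) - (L : Int))) (some (k : Int))).toList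
    = (codigo.toList.drop (k - L)).take L := by
  rw [PySem.Str.toList_slice, PySem.Chars.slice_eq_listSlice]
  have h1 : (k : Int) - (L : Int) = ((k - L : Nat) : Int) := by omega
  rw [h1, PySem.List.slice_natCast]
  congr 1
  omega

-- A's substring test holds iff g occurs right before some '('
lemma pvHit_iff (g codigo : String) :
    pvHit g codigo = true ↔ ∃ k : Nat, k < codigo.toList.length ∧ codigo.toList[k]? = some '(' ∧
      g.toList.length ≤ k ∧ (codigo.toList.drop (k - g.toList.length)).take g.toList.length = g.toList := by
  unfold pvHit
  rw [← PySem.Chars.exists_prefix_drop_iff_isIn]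
  set s := codigo.toList
  set gl := g.toList
  constructor
  · rintro ⟨j, u, hu⟩
    refine ⟨j + gl.length, ?_, ?_, by omega, ?_⟩
    · have hlen := congrArg List.length hu
      simp [List.length_drop] at hlen
      omega
    · rw [← List.getElem?_drop, ← hu, List.append_assoc, List.singleton_append,
        List.getElem?_append_right (by omega)]
      simp
    · have h2 : j + gl.length - gl.length = j := by omega
      rw [h2, ← hu, List.append_assoc, List.take_append_of_le_length (by omega)]
      simp
  · rintro ⟨k, hk, hget, hle, htake⟩
    refine ⟨k - gl.length, s.drop (k + 1), ?_⟩
    have hdrop : s.drop (k - gl.length) = gl ++ s.drop k := by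
      conv_lhs => rw [← List.take_append_drop gl.length (s.drop (k - gl.length))]
      rw [htake, List.drop_drop]
      congr 2
      omega
    have hk' : s.drop k = '(' :: s.drop (k + 1) := by
      rw [List.drop_eq_getElem_cons hk]
      congr 1
      simpa [List.getElem?_eq_getElem hk] using hget
    rw [List.append_assoc, List.singleton_append, hdrop, hk']

-- B's found set holds exactly the queried names A's substring test accepts
lemma pvMem_found (funciones : List String) (codigo g : String) :
    g ∈ pvFound funciones codigo ↔ g ∈ funciones ∧ pvHit g codigo = true := by
  unfold pvFound pvEncontradas
  rw [pvMem_scan]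
  have hempty : g ∉ (PySem.Set.empty : PySem.Set String) := by simp [PySem.Set.empty]
  simp only [hempty, false_or, PySem.Set.mem_ofList]
  constructor
  · rintro ⟨hg, p, hp, hp2, L, hL, hLe, hslice⟩
    refine ⟨hg, ?_⟩
    obtain ⟨k, hk, rfl⟩ := (PySem.List.mem_enumerate_iff _ _ _).mp hp
    simp only [zero_add] at hp2 hLe hslice ⊢
    have hL0 : 0 ≤ L := by
      rcases (PySem.List.mem_dedup _ _).mp hL with h
      obtain ⟨f, _, rfl⟩ := List.mem_map.mp h
      rw [pvLen_cast]
      positivity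
    set Lnat := L.toNat with hLn
    have hLcast : L = (Lnat : Int) := by omega
    have hLk : Lnat ≤ k := by omega
    rw [hLcast] at hslice
    have htl := congrArg String.toList hslice
    rw [pvSlice_toList codigo k Lnat hLk] at htl
    have hglen : g.toList.length = Lnat := by
      have := congrArg List.length htl
      simp only [List.length_take, List.length_drop] at this
      omega
    rw [pvHit_iff]
    refine ⟨k, hk, ?_, by omega, ?_⟩
    · rw [List.getElem?_eq_getElem hk, hp2]
    · rw [hglen, htl]
  · rintro ⟨hg, hhit⟩
    refine ⟨hg, ?_⟩
    obtain ⟨k, hk, hget, hle, htake⟩ := (pvHit_iff g codigo).mp hhit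
    refine ⟨((k : Int), '('), ?_, rfl, (PySem.Str.len g), ?_, ?_, ?_⟩
    · rw [PySem.List.mem_enumerate_iff]
      refine ⟨k, hk, ?_⟩
      have h2 := hget
      rw [List.getElem?_eq_getElem hk, Option.some_inj] at h2
      simp [h2]
    · exact (PySem.List.mem_dedup _ _).mpr (List.mem_map.mpr ⟨g, hg, rfl⟩)
    · show PySem.Str.len g ≤ (k : Int)
      rw [pvLen_cast]
      exact_mod_cast hle
    · show PySem.Str.slice codigo (some ((k : Int) - PySem.Str.len g)) (some (k : Int)) = g
      apply String.toList_inj.mp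
      rw [pvLen_cast, pvSlice_toList codigo k g.toList.length hle, htake]

lemma pvNodup_inner (names found : PySem.Set String) (codigo : String) (i : Int) (lens : List Int)
    (h : found.Nodup) :
    (lens.foldl (fun found L =>
        if L ≤ i then
          let cand := PySem.Str.slice codigo (some (i - L)) (some i)
          if PySem.Set.contains names cand then PySem.Set.add found cand else found
        else found) found).Nodup := by
  induction lens generalizing found with
  | nil => exact h
  | cons L rest ih =>
    rw [List.foldl_cons]
    by_cases h1 : L ≤ i
    · by_cases h2 : PySem.Set.contains names (PySem.Str.slice codigo (some (i - L)) (some i)) = true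
      · simp only [h1, if_true, h2]
        exact ih _ (PySem.Set.nodup_add _ _ h)
      · simp only [h1, if_true, h2]
        exact ih _ h
    · simp only [h1, if_false]
      exact ih _ h

lemma pvNodup_found (funciones : List String) (codigo : String) :
    (pvFound funciones codigo).Nodup := by
  unfold pvFound pvEncontradas
  generalize (PySem.List.enumerate codigo.toList 0) = l
  have h : (PySem.Set.empty : PySem.Set String).Nodup := by simp [PySem.Set.empty]
  generalize (PySem.Set.empty : PySem.Set String) = acc at h
  induction l generalizing acc with
  | nil => exact h
  | cons p rest ih =>
    rw [List.foldl_cons]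
    by_cases h1 : p.2 = '('
    · simp only [h1, if_true]
      exact ih _ (pvNodup_inner _ _ _ _ _ h)
    · simp only [h1, if_false]
      exact ih _ h

-- bumping every member of a duplicate-free list by one
lemma pvBump_getD (fs : List String) (h : fs.Nodup) (o : PySem.Dict String Int) (g : String) :
    (fs.foldl (fun o f => o.insert f (o.getD f 0 + 1)) o).getD g 0
    = if g ∈ fs then o.getD g 0 + 1 else o.getD g 0 := by
  induction fs generalizing o with
  | nil => simp
  | cons f rest ih =>
    rw [List.foldl_cons, ih (List.nodup_cons.mp h).2]
    by_cases hg : g = f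
    · subst hg
      have : g ∉ rest := (List.nodup_cons.mp h).1
      simp [this, PySem.Dict.getD_insert_self]
    · by_cases hr : g ∈ rest <;> simp [hr, hg, PySem.Dict.getD_insert]

-- B's occurrence dict counts, per key, the lines whose found set holds it
lemma pvOcc_getD (funciones ls : List String) (o : PySem.Dict String Int) (g : String) :
    (ls.foldl (fun occ codigo =>
        (pvFound funciones codigo).foldl (fun o f => o.insert f (o.getD f 0 + 1)) occ) o).getD g 0
    = o.getD g 0 + (ls.countP (fun c => decide (g ∈ pvFound funciones c)) : Int) := by
  induction ls generalizing o with
  | nil => simp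
  | cons c rest ih =>
    rw [List.foldl_cons, ih, List.countP_cons, pvBump_getD _ (pvNodup_found funciones c)]
    by_cases hm : g ∈ pvFound funciones c
    · simp only [hm, if_true, decide_true]
      push_cast
      ring
    · simp [hm]

lemma pvFound_def (funciones : List String) (codigo : String) :
    pvEncontradas codigo (PySem.Set.ofList funciones)
      (PySem.List.dedup (funciones.map (fun f => PySem.Str.len f))) = pvFound funciones codigo := rfl

lemma pvB_char (linea funciones : List String) :
    encontrar_invocaciones_alt linea funciones = pvChar linea funciones := by
  simp only [encontrar_invocaciones_alt, pvFound_def]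
  unfold pvChar
  congr 1
  apply PySem.List.foldl_congr_mem
  intro d f hf
  have hocc : ((PySem.List.slice linea (some 3) (some (-1))).foldl (fun occ codigo =>
        (pvFound funciones codigo).foldl (fun o f => o.insert f (o.getD f 0 + 1)) occ)
        PySem.Dict.empty).getD f 0 = (pvCnt linea f : Int) := by
    rw [pvOcc_getD]
    simp only [PySem.Dict.getD_empty, zero_add]
    unfold pvCnt
    congr 1
    apply List.countP_congr
    intro c _
    simp only [decide_eq_true_eq, pvMem_found]
    constructor
    · rintro ⟨_, h⟩; exact h
    · intro h; exact ⟨hf, h⟩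
  simp only [hocc]
  by_cases h : pvCnt linea f = 0
  · simp [h]
  · simp [h]

-- ===== VERDICT (by name: the statement is the Claim_ definition above) =====
theorem encontrar_invocaciones_spec : Claim_equal_encontrar_invocaciones := by
  intro linea funciones _
  unfold Spec_encontrar_invocaciones
  rw [pvA_char, pvB_char]
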